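-- pv_equiv track=rewrite | github.com/Vansh-Arora/rough-Pie | zigzagString.py | convert
-- ===== SOURCE A (Python) =====
-- def convert(A, B):
--     a = A
--     A = []
--     temp = ''
--     for i in range(len(a)):
--         if a[i] != '\n':
--             temp += a[i]
--         else:
--             A.append(temp.strip())
--             temp = ''
--     A.append(temp.strip())
--     size = -1
--     for i in A:
--         if len(i) > size:
--             size = len(i)
--     B = ['.' for i in range(size)]
--     for i in range(len(A)):
--         for j in range(len(A[i])):
--             if A[i][j] != ".":
--                 B[j] = A[i][j]
--     ans  = ''
--     for i in B:
--         if i != ".":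
--             ans += i
--     return (ans)
-- ===== SOURCE B (Python) =====
-- def convert(A, B):
--     # Column-major overlay: for each column take the last line's non-'.' char
--     # (first hit scanning the lines in reverse), skipping empty columns.
--     lines = [l.strip() for l in A.split('\n')]
--     size = max(map(len, lines), default=0)
--     out = []
--     for j in range(size):
--         for line in reversed(lines):
--             if j < len(line) and line[j] != '.':
--                 out.append(line[j])
--                 break
--     return ''.join(out)
-- ===== Notes on version B (the rewrite author's own statement) =====
-- stated objective: alternative
-- what changed: B flips the loop nesting: instead of A's '.'-sentinel buffer written row by row and then filtered, B walks columns and takes, per column, the first non-'.' character found scanning the stripped lines in reverse (last-writer-wins without a buffer), skipping empty columns.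
import Mathlib
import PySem

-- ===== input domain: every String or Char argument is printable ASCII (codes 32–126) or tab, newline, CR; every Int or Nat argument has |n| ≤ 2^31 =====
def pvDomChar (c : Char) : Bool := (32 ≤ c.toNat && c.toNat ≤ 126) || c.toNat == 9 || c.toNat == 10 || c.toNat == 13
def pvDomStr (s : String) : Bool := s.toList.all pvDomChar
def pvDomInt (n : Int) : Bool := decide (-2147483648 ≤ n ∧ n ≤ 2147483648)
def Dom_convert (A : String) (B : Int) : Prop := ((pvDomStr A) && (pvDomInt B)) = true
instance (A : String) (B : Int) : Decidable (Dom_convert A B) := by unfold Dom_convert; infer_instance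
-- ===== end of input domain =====

-- B overlays column-major (scanning the lines in reverse, first non-'.' hit per column)
-- instead of A's row-major writes into a '.'-sentinel buffer; same value, different
-- decomposition (objective: alternative).

-- ===== PORT A =====
def convert (A : String) (B : Int) : String :=
  let a := A.toList
  -- for i in range(len(a)): split on '\n', stripping each piece
  let st := a.foldl (fun (st : List (List Char) × List Char) c =>
      if c ≠ '\n' then (st.1, st.2 ++ [c])
      else (st.1 ++ [PySem.Chars.strip st.2], [])) (([], []) : List (List Char) × List Char)
  let lines := st.1 ++ [PySem.Chars.strip st.2]
  -- size = running maximum of len(i), started at -1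
  let size := lines.foldl (fun s l => if PySem.List.len l > s then PySem.List.len l else s) (-1)
  -- B = ['.' for i in range(size)]
  let buf : List Char := (PySem.List.pyRange 0 size 1).map (fun _ => '.')
  -- for i in range(len(A)): for j in range(len(A[i])): if A[i][j] != '.': B[j] = A[i][j]
  let buf := lines.foldl (fun b l =>
      (PySem.List.pyRange 0 (PySem.List.len l) 1).foldl (fun b j =>
        if PySem.List.pyGetD l j ' ' ≠ '.' then PySem.List.pySetD b j (PySem.List.pyGetD l j ' ') else b) b) buf
  -- ans += i for the non-'.' chars of B
  let ans := buf.foldl (fun s c => if c ≠ '.' then s ++ [c] else s) ([] : List Char)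
  String.ofList ans

-- ===== PORT B =====
def convert_alt (A : String) (B : Int) : String :=
  let lines := (PySem.Chars.splitOn A.toList ['\n']).map PySem.Chars.strip
  let size := PySem.List.maxD (lines.map PySem.List.len) (fun x => x) 0
  -- for j in range(size): first non-'.' hit scanning lines in reverse (break), else skip column
  let out := (PySem.List.pyRange 0 size 1).foldl (fun out j =>
      match lines.reverse.findSome? (fun line =>
          match PySem.List.pyGet? line j with
          | some c => if c ≠ '.' then some c else none
          | none => none) with
      | some c => out ++ [c]
      | none => out) ([] : List Char)
  String.ofList out

-- ===== PRECONDITION & SPEC =====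
def Spec_convert (A : String) (B : Int) (out : String) : Prop := out = convert_alt A B
instance (A : String) (B : Int) (out : String) : Decidable (Spec_convert A B out) := by unfold Spec_convert; infer_instance

-- ===== CLAIM (what is proved, stated in full; the proofs are below) =====
def Claim_equal_convert : Prop := ∀ (A : String) (B : Int), Dom_convert A B → Spec_convert A B (convert A B)

-- ===== LEMMAS AND PROOFS =====

def splitNL : List Char → List Char → List (List Char)
  | [], cur => [cur.reverse]
  | c :: rest, cur => if c = '\n' then cur.reverse :: splitNL rest [] else splitNL rest (c :: cur)

lemma splitOn_go_nl (fuel : Nat) : ∀ (l cur : List Char) (acc : List (List Char)),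
    l.length < fuel →
    PySem.Chars.splitOn.go ['\n'] fuel l cur acc = acc.reverse ++ splitNL l cur := by
  induction fuel with
  | zero => intro l cur acc h; omega
  | succ n ih =>
    intro l cur acc h
    match l with
    | [] => rw [PySem.Chars.splitOn.go.eq_def]; simp [splitNL]
    | c :: rest =>
      rw [PySem.Chars.splitOn.go.eq_def]
      by_cases hc : c = '\n'
      · subst hc
        simp only [List.isPrefixOf, List.isPrefixOf_nil_left, beq_self_eq_true, Bool.true_and,
          if_pos, List.length_cons, List.drop_succ_cons, and_self, ite_true, List.length_nil,
          List.drop_zero]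
        rw [ih rest [] _ (by simp at h ⊢; omega)]
        simp [splitNL]
      · have : (['\n'].isPrefixOf (c :: rest)) = false := by
          simp only [List.isPrefixOf, List.isPrefixOf_nil_left, Bool.and_true,
            beq_eq_false_iff_ne, ne_eq]
          exact fun h => hc h.symm
        simp only [this, Bool.false_eq_true, if_false]
        rw [ih rest (c :: cur) acc (by simp at h ⊢; omega)]
        simp [splitNL, hc]

lemma splitOn_nl (s : List Char) : PySem.Chars.splitOn s ['\n'] = splitNL s [] := by
  unfold PySem.Chars.splitOn
  rw [splitOn_go_nl _ _ _ _ (by omega)]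
  simp

lemma splitNL_ne_nil (l : List Char) : ∀ cur, splitNL l cur ≠ [] := by
  induction l with
  | nil => intro cur; simp [splitNL]
  | cons c rest ih => intro cur; by_cases hc : c = '\n' <;> simp [splitNL, hc, ih]

def pick (j : Nat) (l : List Char) : Option Char :=
  match l[j]? with
  | some c => if c ≠ '.' then some c else none
  | none => none

def innerN (l : List Char) (b : List Char) : List Char :=
  (List.range l.length).foldl (fun b k => if l.getD k ' ' ≠ '.' then b.set k (l.getD k ' ') else b) b

lemma foldA_split (cs : List Char) : ∀ (acc : List (List Char)) (temp : List Char),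
    (cs.foldl (fun (st : List (List Char) × List Char) c =>
        if c ≠ '\n' then (st.1, st.2 ++ [c])
        else (st.1 ++ [PySem.Chars.strip st.2], [])) (acc, temp)).1
      ++ [PySem.Chars.strip (cs.foldl (fun (st : List (List Char) × List Char) c =>
        if c ≠ '\n' then (st.1, st.2 ++ [c])
        else (st.1 ++ [PySem.Chars.strip st.2], [])) (acc, temp)).2]
    = acc ++ (splitNL cs temp.reverse).map PySem.Chars.strip := by
  induction cs with
  | nil => intro acc temp; simp [splitNL]
  | cons c rest ih =>
    intro acc temp
    by_cases hc : c = '\n'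
    · subst hc
      rw [List.foldl_cons, if_neg (not_not_intro rfl), ih]
      simp [splitNL]
    · simp only [List.foldl_cons, if_pos hc, splitNL, if_neg hc]
      rw [ih]
      simp

lemma foldl_set_length (ks : List Nat) (l : List Char) : ∀ (b : List Char),
    (ks.foldl (fun b k => if l.getD k ' ' ≠ '.' then b.set k (l.getD k ' ') else b) b).length = b.length := by
  induction ks with
  | nil => intro b; rfl
  | cons k t ih => intro b; rw [List.foldl_cons, ih]; split <;> simp

lemma innerN_length (l b : List Char) : (innerN l b).length = b.length :=
  foldl_set_length _ l b

lemma innerN_aux (l : List Char) (n : Nat) (hn : n ≤ l.length) (b : List Char)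
    (hlb : l.length ≤ b.length) (j : Nat) :
    ((List.range n).foldl (fun b k => if l.getD k ' ' ≠ '.' then b.set k (l.getD k ' ') else b) b)[j]?
      = (if j < n then pick j l else none).or b[j]? := by
  induction n with
  | zero => simp
  | succ m ih =>
    rw [List.range_succ, List.foldl_append, List.foldl_cons, List.foldl_nil]
    have hm : m < l.length := by omega
    have hgd : l.getD m ' ' = l[m] := List.getD_eq_getElem l ' ' hm
    have hlen : ((List.range m).foldl (fun b k => if l.getD k ' ' ≠ '.' then b.set k (l.getD k ' ') else b) b).length = b.length :=
      foldl_set_length _ l b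
    have hstep : ∀ j' : Nat, ¬ j' < m → ¬ j' = m → (if j' < m + 1 then pick j' l else none) = (if j' < m then pick j' l else none) := by
      intro j' h1 h2
      rw [if_neg (by omega), if_neg h1]
    by_cases hdot : l[m] = '.'
    · rw [if_neg (by rw [hgd, hdot]; exact not_not_intro rfl), ih (by omega)]
      congr 1
      by_cases hj : j < m
      · simp [hj, Nat.lt_succ_of_lt hj]
      · by_cases hjm : j = m
        · subst hjm
          simp [pick, List.getElem?_eq_getElem hm, hdot]
        · exact (hstep j hj hjm).symm
    · rw [if_pos (by rw [hgd]; exact hdot), hgd, List.getElem?_set, hlen, ih (by omega)]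
      by_cases hjm : m = j
      · subst hjm
        rw [if_pos rfl, if_pos (by omega), if_pos (by omega)]
        have : pick m l = some l[m] := by
          simp [pick, List.getElem?_eq_getElem hm, hdot]
        simp [this]
      · rw [if_neg hjm]
        congr 1
        by_cases hj : j < m
        · simp [hj, Nat.lt_succ_of_lt hj]
        · exact (hstep j hj (fun h => hjm h.symm)).symm

lemma innerN_getElem? (l b : List Char) (hlb : l.length ≤ b.length) (j : Nat) :
    (innerN l b)[j]? = (pick j l).or b[j]? := by
  rw [innerN, innerN_aux l l.length le_rfl b hlb j]
  by_cases hj : j < l.length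
  · rw [if_pos hj]
  · rw [if_neg hj]
    have : l[j]? = none := by simp; omega
    simp [pick, this]

lemma outer_length (lines : List (List Char)) : ∀ (b : List Char),
    (lines.foldl (fun b l => innerN l b) b).length = b.length := by
  induction lines with
  | nil => intro b; rfl
  | cons l rest ih => intro b; rw [List.foldl_cons, ih, innerN_length]

lemma outer_getElem? (lines : List (List Char)) : ∀ (b : List Char),
    (∀ l ∈ lines, l.length ≤ b.length) → ∀ j : Nat,
    (lines.foldl (fun b l => innerN l b) b)[j]? = (lines.reverse.findSome? (pick j)).or b[j]? := by
  induction lines with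
  | nil => intro b _ j; simp
  | cons l rest ih =>
    intro b hb j
    rw [List.foldl_cons, ih (innerN l b)
          (fun l' hl' => by rw [innerN_length]; exact hb l' (List.mem_cons_of_mem _ hl')) j,
        innerN_getElem? l b (hb l (List.mem_cons_self)) j,
        List.reverse_cons, List.findSome?_append, Option.or_assoc]
    simp

lemma pick_ne_dot {j : Nat} {l : List Char} {c : Char} (h : pick j l = some c) : c ≠ '.' := by
  unfold pick at h
  cases hg : l[j]? with
  | none => rw [hg] at h; exact absurd h (by simp)
  | some c' =>
    rw [hg] at h
    by_cases hd : c' = '.'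
    · simp [hd] at h
    · simp only [ne_eq, hd, not_false_eq_true, if_pos, Option.some.injEq] at h
      subst h
      exact hd

lemma filter_eq_flatMap_range (buf : List Char) :
    buf.filter (fun c => decide (c ≠ '.')) =
    (List.range buf.length).flatMap (fun k => if buf.getD k '.' ≠ '.' then [buf.getD k '.'] else []) := by
  induction buf using List.reverseRecOn with
  | nil => rfl
  | append_singleton xs x ih =>
    rw [List.filter_append, List.length_append, List.length_singleton, List.range_succ,
        List.flatMap_append, ih]
    congr 1
    · apply List.flatMap_congr
      intro k hk
      have hk' : k < xs.length := List.mem_range.mp hk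
      rw [List.getD_append _ _ _ _ hk']
    · have hx : (xs ++ [x]).getD xs.length '.' = x := by
        rw [List.getD_eq_getElem?_getD, List.getElem?_concat_length]
        rfl
      rw [List.flatMap_cons, List.flatMap_nil, List.append_nil, hx]
      by_cases hd : x = '.'
      · rw [if_neg (not_not_intro hd)]
        simp [hd]
      · rw [if_pos hd]
        simp [hd]

lemma castfold_max (rest : List (List Char)) : ∀ (a : Nat),
    rest.foldl (fun s l => max s ((l.length : Int))) (a : Int)
      = ((rest.foldl (fun m l => max m l.length) a : Nat) : Int) := by
  induction rest with
  | nil => intro a; rfl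
  | cons l t ih =>
    intro a
    rw [List.foldl_cons, List.foldl_cons, ← Nat.cast_max, ih]

lemma col_ne_dot {lines : List (List Char)} {j : Nat} {c : Char}
    (h : lines.reverse.findSome? (pick j) = some c) : c ≠ '.' := by
  obtain ⟨l, _, hl⟩ := List.exists_of_findSome?_eq_some h
  exact pick_ne_dot hl

lemma core (lines : List (List Char)) (hne : lines ≠ []) :
    (let size := lines.foldl (fun s l => if PySem.List.len l > s then PySem.List.len l else s) (-1)
     let buf : List Char := (PySem.List.pyRange 0 size 1).map (fun _ => '.')
     let buf := lines.foldl (fun b l =>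
        (PySem.List.pyRange 0 (PySem.List.len l) 1).foldl (fun b j =>
          if PySem.List.pyGetD l j ' ' ≠ '.' then PySem.List.pySetD b j (PySem.List.pyGetD l j ' ') else b) b) buf
     buf.foldl (fun s c => if c ≠ '.' then s ++ [c] else s) ([] : List Char))
  = (let size := PySem.List.maxD (lines.map PySem.List.len) (fun x => x) 0
     (PySem.List.pyRange 0 size 1).foldl (fun out j =>
        match lines.reverse.findSome? (fun line =>
            match PySem.List.pyGet? line j with
            | some c => if c ≠ '.' then some c else none
            | none => none) with
        | some c => out ++ [c]
        | none => out) ([] : List Char)) := by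
  obtain ⟨l0, rest, rfl⟩ := List.exists_cons_of_ne_nil hne
  simp only
  set N : Nat := rest.foldl (fun m l => max m l.length) l0.length with hN
  -- both sizes are N
  have hfunA : (fun (s : Int) (l : List Char) => if PySem.List.len l > s then PySem.List.len l else s)
      = (fun s l => max s ((l.length : Int))) := by
    funext s l
    rw [PySem.List.len_eq]
    by_cases h : (l.length : Int) ≤ s
    · rw [if_neg (by omega), max_eq_left h]
    · rw [if_pos (by omega), max_eq_right (by omega)]
  have hsizeA : (l0 :: rest).foldl (fun s l => if PySem.List.len l > s then PySem.List.len l else s) (-1) = (N : Int) := by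
    rw [hfunA, List.foldl_cons, max_eq_right (by omega : (-1 : Int) ≤ (l0.length : Int)),
        castfold_max]
  have hsizeB : PySem.List.maxD ((l0 :: rest).map PySem.List.len) (fun x => x) 0 = (N : Int) := by
    rw [List.map_cons, PySem.List.maxD_id_cons, List.foldl_map]
    have : (fun (s : Int) (l : List Char) => max s (PySem.List.len l)) = (fun s l => max s ((l.length : Int))) := by
      funext s l; rw [PySem.List.len_eq]
    rw [this]
    rw [PySem.List.len_eq, castfold_max]
  rw [hsizeA, hsizeB]
  -- initial buffer is replicate N '.'
  have hbuf0 : ((PySem.List.pyRange 0 (N : Int) 1).map (fun _ => '.')) = List.replicate N '.' := by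
    rw [PySem.List.pyRange_zero_nat, List.map_map]
    have : ((fun (_ : Int) => '.') ∘ (fun (k : Nat) => (k : Int))) = (fun (_ : Nat) => '.') := rfl
    rw [this, List.map_const', List.length_range]
  rw [hbuf0]
  -- A's overlay loop is the innerN fold
  have hinner : (fun (b : List Char) (l : List Char) =>
      (PySem.List.pyRange 0 (PySem.List.len l) 1).foldl (fun b j =>
        if PySem.List.pyGetD l j ' ' ≠ '.' then PySem.List.pySetD b j (PySem.List.pyGetD l j ' ') else b) b)
      = (fun b l => innerN l b) := by
    funext b l
    rw [PySem.List.len_eq, PySem.List.pyRange_zero_nat, List.foldl_map, innerN]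
    congr 1
    funext b' k
    rw [PySem.List.pyGetD_natCast, PySem.List.pySetD_natCast]
  rw [hinner]
  set bufF := (l0 :: rest).foldl (fun b l => innerN l b) (List.replicate N '.') with hbufF
  -- every line fits in the buffer
  have hfits : ∀ l ∈ (l0 :: rest), l.length ≤ (List.replicate N '.').length := by
    intro l hl
    rw [List.length_replicate]
    have := (PySem.List.le_foldl_max_nat rest (fun l => l.length) l0.length).2
    rcases List.mem_cons.mp hl with rfl | hl'
    · exact le_trans (PySem.List.le_foldl_max_nat rest (fun l => l.length) l.length).1 le_rfl
    · exact this l hl'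
  have hlenF : bufF.length = N := by rw [hbufF, outer_length, List.length_replicate]
  have hget : ∀ k : Nat, k < N →
      bufF[k]? = ((l0 :: rest).reverse.findSome? (pick k)).or (some '.') := by
    intro k hk
    rw [hbufF, outer_getElem? _ _ hfits k, List.getElem?_replicate, if_pos hk]
  -- A's final collection = filter = flatMap over columns
  rw [PySem.List.foldl_append_ite_eq_filter (fun c => c ≠ '.') bufF [], List.nil_append,
      filter_eq_flatMap_range, hlenF]
  -- B side: pyRange to Nat range, inner function is pick
  rw [PySem.List.pyRange_zero_nat, List.foldl_map]
  have hBfun : (fun (out : List Char) (k : Nat) =>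
      match (l0 :: rest).reverse.findSome? (fun line =>
          match PySem.List.pyGet? line ((k : Nat) : Int) with
          | some c => if c ≠ '.' then some c else none
          | none => none) with
      | some c => out ++ [c]
      | none => out)
      = (fun out k => out ++ (match (l0 :: rest).reverse.findSome? (pick k) with
          | some c => [c]
          | none => [])) := by
    funext out k
    have : (fun (line : List Char) =>
        match PySem.List.pyGet? line ((k : Nat) : Int) with
        | some c => if c ≠ '.' then some c else none
        | none => none) = pick k := by
      funext line
      rw [pick, PySem.List.pyGet?_natCast]
    rw [this]
    cases ((l0 :: rest).reverse.findSome? (pick k)) <;> simp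
  rw [hBfun, PySem.List.foldl_append_eq_flatMap, List.nil_append]
  -- column-by-column agreement
  apply List.flatMap_congr
  intro k hk
  have hk' : k < N := List.mem_range.mp hk
  cases hcol : ((l0 :: rest).reverse.findSome? (pick k)) with
  | none =>
    rw [List.getD_eq_getElem?_getD, hget k hk', hcol]
    simp
  | some c =>
    rw [List.getD_eq_getElem?_getD, hget k hk', hcol]
    simp [col_ne_dot hcol]

theorem conv_eq (A : String) (B : Int) : convert A B = convert_alt A B := by
  unfold convert convert_alt
  simp only
  have hlines : ((A.toList.foldl (fun (st : List (List Char) × List Char) c =>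
      if c ≠ '\n' then (st.1, st.2 ++ [c])
      else (st.1 ++ [PySem.Chars.strip st.2], [])) (([], []) : List (List Char) × List Char)).1
      ++ [PySem.Chars.strip ((A.toList.foldl (fun (st : List (List Char) × List Char) c =>
      if c ≠ '\n' then (st.1, st.2 ++ [c])
      else (st.1 ++ [PySem.Chars.strip st.2], [])) (([], []) : List (List Char) × List Char)).2)])
      = (PySem.Chars.splitOn A.toList ['\n']).map PySem.Chars.strip := by
    rw [splitOn_nl]
    have := foldA_split A.toList [] []
    simpa using this
  rw [hlines]
  have hne : (PySem.Chars.splitOn A.toList ['\n']).map PySem.Chars.strip ≠ [] := by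
    rw [splitOn_nl]
    simp [splitNL_ne_nil]
  have := core ((PySem.Chars.splitOn A.toList ['\n']).map PySem.Chars.strip) hne
  simp only at this
  rw [this]

-- ===== VERDICT (by name: the statement is the Claim_ definition above) =====
theorem convert_spec : Claim_equal_convert := by
  intro A B _
  unfold Spec_convert
  exact conv_eq A B
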